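-- pv_equiv track=rewrite | github.com/garam0107/Algorithme | IM/16268.py | balloon
-- ===== SOURCE A (Python) =====
-- def balloon(arr,N,M):
--     dr = [0,1,0,-1]
--     dc = [1,0,-1,0]
--     shot = 4
--     maxValue = 0
--     for i in range(N):
--         for j in range(M):
--             total = arr[i][j]
--             for k in range(shot):
--                 nr = i + dr[k]
--                 nc = j + dc[k]
--                 if 0 <= nr < N and 0 <= nc < M:
--                     total += arr[nr][nc]
--             if maxValue < total:
--                 maxValue = total
--     return maxValue
-- ===== SOURCE B (Python) =====
-- def balloon(arr, N, M):
--     # Scatter: push each cell's value into its own total and its in-bounds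
--     # orthogonal neighbors' totals, then take the running max (seeded at 0).
--     S = [[0] * M for _ in range(N)]
--     for i in range(N):
--         for j in range(M):
--             v = arr[i][j]
--             S[i][j] += v
--             if i + 1 < N:
--                 S[i + 1][j] += v
--             if i - 1 >= 0:
--                 S[i - 1][j] += v
--             if j + 1 < M:
--                 S[i][j + 1] += v
--             if j - 1 >= 0:
--                 S[i][j - 1] += v
--     best = 0
--     for row in S:
--         for x in row:
--             best = max(best, x)
--     return best
-- ===== Notes on version B (the rewrite author's own statement) =====
-- stated objective: alternative
-- what changed: B replaces A's per-cell gather (each cell pulls its in-bounds neighbors' values, nested dr/dc loop) with a scatter pass that pushes each cell's value into an explicit accumulator grid entry for itself and each in-bounds neighbor, then takes the max over that grid.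
import Mathlib
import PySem

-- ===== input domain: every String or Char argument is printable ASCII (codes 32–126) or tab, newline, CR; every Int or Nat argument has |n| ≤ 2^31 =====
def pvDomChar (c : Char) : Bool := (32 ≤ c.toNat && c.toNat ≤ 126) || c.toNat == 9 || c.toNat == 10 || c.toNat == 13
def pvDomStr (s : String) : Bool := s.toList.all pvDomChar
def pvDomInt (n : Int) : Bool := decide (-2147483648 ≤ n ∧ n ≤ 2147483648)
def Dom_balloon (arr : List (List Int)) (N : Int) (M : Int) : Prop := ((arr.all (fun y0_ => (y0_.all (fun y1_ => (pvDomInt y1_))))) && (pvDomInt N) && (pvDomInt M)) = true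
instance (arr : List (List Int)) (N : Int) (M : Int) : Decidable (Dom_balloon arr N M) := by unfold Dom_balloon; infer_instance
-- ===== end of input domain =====

-- B re-implements the plus-shaped max by SCATTERING each cell's value to itself and its
-- in-bounds neighbors in an accumulator grid, then taking the max over that grid (same values).

-- ===== PORT A =====
-- arr[i][j]; the default 0/[] is never used on inputs satisfying Pre_balloon (indices in range)
def pvA (arr : List (List Int)) (i j : Int) : Int :=
  PySem.List.pyGetD (PySem.List.pyGetD arr i []) j 0

-- the inner 'for k in range(shot)' loop of A, starting from total = arr[i][j]
def pvATotal (arr : List (List Int)) (N M i j : Int) : Int :=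
  (PySem.List.pyRange 0 4 1).foldl (fun total k =>
    let nr := i + PySem.List.pyGetD [0, 1, 0, -1] k 0
    let nc := j + PySem.List.pyGetD [1, 0, -1, 0] k 0
    if 0 ≤ nr ∧ nr < N ∧ 0 ≤ nc ∧ nc < M then
      total + pvA arr nr nc
    else total) (pvA arr i j)

def balloon (arr : List (List Int)) (N : Int) (M : Int) : Int :=
  (PySem.List.pyRange 0 N 1).foldl (fun maxValue i =>
    (PySem.List.pyRange 0 M 1).foldl (fun maxValue j =>
      let total := pvATotal arr N M i j
      if maxValue < total then total else maxValue) maxValue) 0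

-- ===== PORT B =====
-- S[i][j] += v; in Source B every such update has 0 ≤ i < len(S), 0 ≤ j < len(S[i]) (exact there)
def pvAdd2 (S : List (List Int)) (i j : Int) (v : Int) : List (List Int) :=
  S.modify i.toNat (fun row => row.modify j.toNat (· + v))

-- scatter the value of cell (i, j) to itself and its in-bounds neighbors
def pvScatter (arr : List (List Int)) (N M : Int) (S : List (List Int)) (i j : Int) :
    List (List Int) :=
  let v := pvA arr i j
  let S1 := pvAdd2 S i j v
  let S2 := if i + 1 < N then pvAdd2 S1 (i + 1) j v else S1
  let S3 := if 0 ≤ i - 1 then pvAdd2 S2 (i - 1) j v else S2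
  let S4 := if j + 1 < M then pvAdd2 S3 i (j + 1) v else S3
  if 0 ≤ j - 1 then pvAdd2 S4 i (j - 1) v else S4

def balloon_alt (arr : List (List Int)) (N : Int) (M : Int) : Int :=
  let S0 := (PySem.List.pyRange 0 N 1).map (fun _ => List.replicate M.toNat (0 : Int))
  let S := (PySem.List.pyRange 0 N 1).foldl (fun S i =>
    (PySem.List.pyRange 0 M 1).foldl (fun S j => pvScatter arr N M S i j) S) S0
  S.foldl (fun best row => row.foldl (fun best x => max best x) best) 0

-- ===== PRECONDITION & SPEC =====
-- Pre_: exactly the inputs on which Python A returns (no IndexError): whenever both loop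
-- ranges are nonempty, arr must have at least N rows and each of the first N rows at least M entries.
def Pre_balloon (arr : List (List Int)) (N : Int) (M : Int) : Prop :=
  N ≤ 0 ∨ M ≤ 0 ∨ (N ≤ (arr.length : Int) ∧ ∀ row ∈ arr.take N.toNat, M ≤ (row.length : Int))
instance (arr : List (List Int)) (N : Int) (M : Int) : Decidable (Pre_balloon arr N M) := by
  unfold Pre_balloon; infer_instance

def pvWitness_balloon : List (List Int) × Int × Int := ([[1, 2], [3, -4]], 2, 2)

def Spec_balloon (arr : List (List Int)) (N : Int) (M : Int) (out : Int) : Prop :=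
  out = balloon_alt arr N M
instance (arr : List (List Int)) (N : Int) (M : Int) (out : Int) :
    Decidable (Spec_balloon arr N M out) := by unfold Spec_balloon; infer_instance

-- ===== CLAIM (what is proved, stated in full; the proofs are below) =====
def Claim_equal_balloon : Prop := ∀ (arr : List (List Int)) (N : Int) (M : Int),
  Dom_balloon arr N M → Pre_balloon arr N M → Spec_balloon arr N M (balloon arr N M)

-- ===== LEMMAS AND PROOFS =====

-- the common per-cell value: a cell plus its in-bounds orthogonal neighbors
def pvPlus (arr : List (List Int)) (N M i j : Int) : Int :=
  pvA arr i j
    + (if i + 1 < N then pvA arr (i + 1) j else 0)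
    + (if 0 ≤ i - 1 then pvA arr (i - 1) j else 0)
    + (if j + 1 < M then pvA arr i (j + 1) else 0)
    + (if 0 ≤ j - 1 then pvA arr i (j - 1) else 0)

-- the row-major list of visited cells
def pvCells (N M : Int) : List (Int × Int) :=
  (PySem.List.pyRange 0 N 1).flatMap (fun i => (PySem.List.pyRange 0 M 1).map (fun j => (i, j)))

-- reading the accumulator grid at Int coordinates (used at 0 ≤ i < N, 0 ≤ j < M)
def pvG (S : List (List Int)) (i j : Int) : Int :=
  (S.getD i.toNat []).getD j.toNat 0

-- the grid keeps N rows of M entries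
def pvShape (S : List (List Int)) (N M : Int) : Prop :=
  S.length = N.toNat ∧ ∀ p : Nat, p < N.toNat → (S.getD p []).length = M.toNat

-- contribution of the scatter at source cell (i, j) to position (p, q)
def pvC (arr : List (List Int)) (N M i j p q : Int) : Int :=
  (if i = p ∧ j = q then pvA arr i j else 0)
    + (if i + 1 < N ∧ (i + 1 = p ∧ j = q) then pvA arr i j else 0)
    + (if 0 ≤ i - 1 ∧ (i - 1 = p ∧ j = q) then pvA arr i j else 0)
    + (if j + 1 < M ∧ (i = p ∧ j + 1 = q) then pvA arr i j else 0)
    + (if 0 ≤ j - 1 ∧ (i = p ∧ j - 1 = q) then pvA arr i j else 0)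

theorem pv_if_lt_eq_max (a b : Int) : (if a < b then b else a) = max a b := by
  rw [max_def]; split_ifs <;> omega

theorem pv_getD_modify {α : Type} (S : List α) (t p : Nat) (f : α → α) (d : α) :
    (S.modify t f).getD p d =
      if t = p ∧ p < S.length then f (S.getD p d) else S.getD p d := by
  rw [List.getD_eq_getElem?_getD, List.getD_eq_getElem?_getD, List.getElem?_modify]
  by_cases hp : p < S.length
  · rw [List.getElem?_eq_getElem hp]
    by_cases ht : t = p <;> simp [ht, hp]
  · rw [List.getElem?_eq_none (by omega)]
    simp [hp]

theorem pv_shape_add2 (S : List (List Int)) (N M i j v : Int) (h : pvShape S N M) :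
    pvShape (pvAdd2 S i j v) N M := by
  obtain ⟨h1, h2⟩ := h
  refine ⟨by simpa [pvAdd2] using h1, fun p hp => ?_⟩
  rw [pvAdd2, pv_getD_modify]
  split_ifs with hc
  · rw [List.length_modify]; exact h2 p hp
  · exact h2 p hp

theorem pv_g_add2 (S : List (List Int)) (N M : Int) (h : pvShape S N M)
    (i j v p q : Int) (hi : 0 ≤ i ∧ i < N) (hj : 0 ≤ j ∧ j < M)
    (hp : 0 ≤ p ∧ p < N) (hq : 0 ≤ q ∧ q < M) :
    pvG (pvAdd2 S i j v) p q = pvG S p q + (if i = p ∧ j = q then v else 0) := by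
  obtain ⟨h1, h2⟩ := h
  have hplen : p.toNat < S.length := by omega
  have hqlen : q.toNat < (S.getD p.toNat []).length := by
    rw [h2 p.toNat (by omega)]; omega
  rw [pvG, pvG, pvAdd2, pv_getD_modify]
  by_cases hip : i = p
  · have : i.toNat = p.toNat := by omega
    rw [if_pos ⟨this, hplen⟩, pv_getD_modify]
    by_cases hjq : j = q
    · have : j.toNat = q.toNat := by omega
      rw [if_pos ⟨this, hqlen⟩, if_pos ⟨hip, hjq⟩]
    · have : j.toNat ≠ q.toNat := by omega
      rw [if_neg (by tauto), if_neg (by tauto)]; ring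
  · have : i.toNat ≠ p.toNat := by omega
    rw [if_neg (by tauto), if_neg (by tauto)]; ring

theorem pv_shape_condAdd (S : List (List Int)) (N M : Int) (h : pvShape S N M)
    (c : Prop) [Decidable c] (i j v : Int) :
    pvShape (if c then pvAdd2 S i j v else S) N M := by
  split
  · exact pv_shape_add2 S N M i j v h
  · exact h

theorem pv_g_condAdd (S : List (List Int)) (N M : Int) (h : pvShape S N M)
    (c : Prop) [Decidable c] (i j v p q : Int)
    (hij : c → 0 ≤ i ∧ i < N ∧ 0 ≤ j ∧ j < M)
    (hp : 0 ≤ p ∧ p < N) (hq : 0 ≤ q ∧ q < M) :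
    pvG (if c then pvAdd2 S i j v else S) p q =
      pvG S p q + (if c ∧ (i = p ∧ j = q) then v else 0) := by
  by_cases hc : c
  · obtain ⟨a1, a2, a3, a4⟩ := hij hc
    rw [if_pos hc, pv_g_add2 S N M h i j v p q ⟨a1, a2⟩ ⟨a3, a4⟩ hp hq]
    by_cases he : i = p ∧ j = q
    · rw [if_pos he, if_pos ⟨hc, he⟩]
    · rw [if_neg he, if_neg (by tauto)]
  · rw [if_neg hc, if_neg (by tauto)]; ring

theorem pv_shape_scatter (arr : List (List Int)) (N M : Int) (S : List (List Int))
    (h : pvShape S N M) (i j : Int) (_hi : 0 ≤ i ∧ i < N) (_hj : 0 ≤ j ∧ j < M) :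
    pvShape (pvScatter arr N M S i j) N M := by
  dsimp only [pvScatter]
  apply pv_shape_condAdd
  apply pv_shape_condAdd
  apply pv_shape_condAdd
  apply pv_shape_condAdd
  exact pv_shape_add2 S N M i j _ h

theorem pv_g_scatter (arr : List (List Int)) (N M : Int) (S : List (List Int))
    (h : pvShape S N M) (i j p q : Int) (hi : 0 ≤ i ∧ i < N) (hj : 0 ≤ j ∧ j < M)
    (hp : 0 ≤ p ∧ p < N) (hq : 0 ≤ q ∧ q < M) :
    pvG (pvScatter arr N M S i j) p q = pvG S p q + pvC arr N M i j p q := by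
  obtain ⟨hi1, hi2⟩ := hi
  obtain ⟨hj1, hj2⟩ := hj
  dsimp only [pvScatter]
  set v := pvA arr i j with hv
  set S1 := pvAdd2 S i j v with hS1
  set S2 := if i + 1 < N then pvAdd2 S1 (i + 1) j v else S1 with hS2
  set S3 := if 0 ≤ i - 1 then pvAdd2 S2 (i - 1) j v else S2 with hS3
  set S4 := if j + 1 < M then pvAdd2 S3 i (j + 1) v else S3 with hS4
  have sh1 : pvShape S1 N M := pv_shape_add2 S N M i j v h
  have sh2 : pvShape S2 N M := by rw [hS2]; exact pv_shape_condAdd S1 N M sh1 _ _ _ _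
  have sh3 : pvShape S3 N M := by rw [hS3]; exact pv_shape_condAdd S2 N M sh2 _ _ _ _
  have sh4 : pvShape S4 N M := by rw [hS4]; exact pv_shape_condAdd S3 N M sh3 _ _ _ _
  have e1 : pvG S1 p q = pvG S p q + (if i = p ∧ j = q then v else 0) :=
    pv_g_add2 S N M h i j v p q ⟨hi1, hi2⟩ ⟨hj1, hj2⟩ hp hq
  have e2 : pvG S2 p q = pvG S1 p q + (if i + 1 < N ∧ (i + 1 = p ∧ j = q) then v else 0) := by
    rw [hS2]
    exact pv_g_condAdd S1 N M sh1 _ _ _ _ _ _ (fun hc => ⟨by omega, hc, hj1, hj2⟩) hp hq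
  have e3 : pvG S3 p q = pvG S2 p q + (if 0 ≤ i - 1 ∧ (i - 1 = p ∧ j = q) then v else 0) := by
    rw [hS3]
    exact pv_g_condAdd S2 N M sh2 _ _ _ _ _ _ (fun hc => ⟨hc, by omega, hj1, hj2⟩) hp hq
  have e4 : pvG S4 p q = pvG S3 p q + (if j + 1 < M ∧ (i = p ∧ j + 1 = q) then v else 0) := by
    rw [hS4]
    exact pv_g_condAdd S3 N M sh3 _ _ _ _ _ _ (fun hc => ⟨hi1, hi2, by omega, hc⟩) hp hq
  have e5 : pvG (if 0 ≤ j - 1 then pvAdd2 S4 i (j - 1) v else S4) p q =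
      pvG S4 p q + (if 0 ≤ j - 1 ∧ (i = p ∧ j - 1 = q) then v else 0) :=
    pv_g_condAdd S4 N M sh4 _ _ _ _ _ _ (fun hc => ⟨hi1, hi2, hc, by omega⟩) hp hq
  rw [e5, e4, e3, e2, e1, pvC, hv]
  ring

theorem pv_fold_scatter (arr : List (List Int)) (N M : Int) (L : List (Int × Int)) :
    ∀ S : List (List Int), pvShape S N M →
      (∀ c ∈ L, 0 ≤ c.1 ∧ c.1 < N ∧ 0 ≤ c.2 ∧ c.2 < M) →
      pvShape (L.foldl (fun S c => pvScatter arr N M S c.1 c.2) S) N M ∧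
      ∀ p q : Int, (0 ≤ p ∧ p < N) → (0 ≤ q ∧ q < M) →
        pvG (L.foldl (fun S c => pvScatter arr N M S c.1 c.2) S) p q =
          pvG S p q + (L.map (fun c => pvC arr N M c.1 c.2 p q)).sum := by
  induction L with
  | nil => intro S hS _; exact ⟨hS, fun p q _ _ => by simp⟩
  | cons c L ih =>
    intro S hS hb
    obtain ⟨b1, b2, b3, b4⟩ := hb c List.mem_cons_self
    have hS' : pvShape (pvScatter arr N M S c.1 c.2) N M :=
      pv_shape_scatter arr N M S hS c.1 c.2 ⟨b1, b2⟩ ⟨b3, b4⟩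
    have hb' : ∀ x ∈ L, 0 ≤ x.1 ∧ x.1 < N ∧ 0 ≤ x.2 ∧ x.2 < M :=
      fun x hx => hb x (List.mem_cons_of_mem _ hx)
    obtain ⟨ihS, ihG⟩ := ih (pvScatter arr N M S c.1 c.2) hS' hb'
    refine ⟨by simpa using ihS, fun p q hp hq => ?_⟩
    rw [List.foldl_cons, ihG p q hp hq,
      pv_g_scatter arr N M S hS c.1 c.2 p q ⟨b1, b2⟩ ⟨b3, b4⟩ hp hq]
    simp [List.map_cons]
    ring

theorem pv_mem_cells (N M : Int) (c : Int × Int) :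
    c ∈ pvCells N M ↔ 0 ≤ c.1 ∧ c.1 < N ∧ 0 ≤ c.2 ∧ c.2 < M := by
  obtain ⟨c1, c2⟩ := c
  simp [pvCells, List.mem_flatMap, PySem.List.mem_pyRange_one]
  tauto

theorem pv_sum_ite_mem (L : List Int) (hL : L.Nodup) (c : Int) (f : Int → Int) :
    (L.map (fun x => if x = c then f x else 0)).sum = if c ∈ L then f c else 0 := by
  induction L with
  | nil => simp
  | cons a L ih =>
    obtain ⟨ha, hnd⟩ := List.nodup_cons.mp hL
    rw [List.map_cons, List.sum_cons, ih hnd]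
    by_cases hac : a = c
    · subst hac
      rw [if_pos rfl, if_neg (by exact fun h => ha h), if_pos List.mem_cons_self]
      ring
    · rw [if_neg hac]
      by_cases hc : c ∈ L
      · rw [if_pos hc, if_pos (List.mem_cons_of_mem _ hc)]; ring
      · rw [if_neg hc, if_neg (by rw [List.mem_cons]; tauto)]; ring

theorem pv_sum_cells_ite (N M : Int) (c : Int × Int) (f : Int × Int → Int) :
    ((pvCells N M).map (fun x => if x = c then f x else 0)).sum =
      if 0 ≤ c.1 ∧ c.1 < N ∧ 0 ≤ c.2 ∧ c.2 < M then f c else 0 := by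
  obtain ⟨c1, c2⟩ := c
  rw [pvCells, List.map_flatMap, List.flatMap_def, List.sum_flatten, List.map_map]
  simp only [Function.comp_def]
  have hinner : ∀ i : Int,
      (((PySem.List.pyRange 0 M 1).map (fun j => (i, j))).map
        (fun x => if x = (c1, c2) then f x else 0)).sum =
      if i = c1 then (if 0 ≤ c2 ∧ c2 < M then f (c1, c2) else 0) else 0 := by
    intro i
    rw [List.map_map]
    by_cases hic : i = c1
    · subst hic
      have : ((fun x => if x = (i, c2) then f x else 0) ∘ fun j => (i, j)) =
          fun j => if j = c2 then f (i, j) else 0 := by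
        funext j
        simp [Prod.ext_iff]
      rw [if_pos rfl, this, pv_sum_ite_mem _ (PySem.List.nodup_pyRange_one 0 M) c2
        (fun j => f (i, j))]
      simp only [PySem.List.mem_pyRange_one]
    · rw [if_neg hic]
      have : ((fun x => if x = (c1, c2) then f x else 0) ∘ fun j => (i, j)) =
          fun _ => (0 : Int) := by
        funext j
        simp [Prod.ext_iff, hic]
      rw [this, List.map_const']
      simp
  rw [List.map_congr_left (fun i _ => hinner i),
    pv_sum_ite_mem _ (PySem.List.nodup_pyRange_one 0 N) c1 _]
  simp only [PySem.List.mem_pyRange_one]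
  split_ifs <;> first | rfl | omega

theorem pv_sum_c (arr : List (List Int)) (N M p q : Int)
    (hp : 0 ≤ p ∧ p < N) (hq : 0 ≤ q ∧ q < M) :
    ((pvCells N M).map (fun c => pvC arr N M c.1 c.2 p q)).sum = pvPlus arr N M p q := by
  have hC : ∀ c : Int × Int, pvC arr N M c.1 c.2 p q =
      (if c = (p, q) then pvA arr p q else 0)
      + ((if c = (p - 1, q) then pvA arr (p - 1) q else 0)
      + ((if c = (p + 1, q) then pvA arr (p + 1) q else 0)
      + ((if c = (p, q - 1) then pvA arr p (q - 1) else 0)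
      + (if c = (p, q + 1) then pvA arr p (q + 1) else 0)))) := by
    rintro ⟨i, j⟩
    simp only [pvC, Prod.mk.injEq]
    have e1 : (if i = p ∧ j = q then pvA arr i j else 0) =
        (if (i = p ∧ j = q) then pvA arr p q else 0) := by
      split_ifs with h
      · rw [h.1, h.2]
      · rfl
    have e2 : (if i + 1 < N ∧ (i + 1 = p ∧ j = q) then pvA arr i j else 0) =
        (if i = p - 1 ∧ j = q then pvA arr (p - 1) q else 0) := by
      by_cases hr : i = p - 1 ∧ j = q
      · rw [if_pos (by omega), if_pos hr, hr.1, hr.2]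
      · rw [if_neg (by omega), if_neg hr]
    have e3 : (if 0 ≤ i - 1 ∧ (i - 1 = p ∧ j = q) then pvA arr i j else 0) =
        (if i = p + 1 ∧ j = q then pvA arr (p + 1) q else 0) := by
      by_cases hr : i = p + 1 ∧ j = q
      · rw [if_pos (by omega), if_pos hr, hr.1, hr.2]
      · rw [if_neg (by omega), if_neg hr]
    have e4 : (if j + 1 < M ∧ (i = p ∧ j + 1 = q) then pvA arr i j else 0) =
        (if i = p ∧ j = q - 1 then pvA arr p (q - 1) else 0) := by
      by_cases hr : i = p ∧ j = q - 1
      · rw [if_pos (by omega), if_pos hr, hr.1, hr.2]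
      · rw [if_neg (by omega), if_neg hr]
    have e5 : (if 0 ≤ j - 1 ∧ (i = p ∧ j - 1 = q) then pvA arr i j else 0) =
        (if i = p ∧ j = q + 1 then pvA arr p (q + 1) else 0) := by
      by_cases hr : i = p ∧ j = q + 1
      · rw [if_pos (by omega), if_pos hr, hr.1, hr.2]
      · rw [if_neg (by omega), if_neg hr]
    rw [e1, e2, e3, e4, e5]
    ring
  rw [List.map_congr_left (fun c _ => hC c)]
  rw [PySem.List.sum_map_add_int, PySem.List.sum_map_add_int, PySem.List.sum_map_add_int,
    PySem.List.sum_map_add_int]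
  rw [pv_sum_cells_ite N M (p, q), pv_sum_cells_ite N M (p - 1, q),
    pv_sum_cells_ite N M (p + 1, q), pv_sum_cells_ite N M (p, q - 1),
    pv_sum_cells_ite N M (p, q + 1)]
  dsimp only
  have f1 : (if 0 ≤ p ∧ p < N ∧ 0 ≤ q ∧ q < M then pvA arr p q else 0) = pvA arr p q :=
    if_pos (by omega)
  have f2 : (if 0 ≤ p - 1 ∧ p - 1 < N ∧ 0 ≤ q ∧ q < M then pvA arr (p - 1) q else 0) =
      (if 0 ≤ p - 1 then pvA arr (p - 1) q else 0) := by
    by_cases h : 0 ≤ p - 1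
    · rw [if_pos (by omega), if_pos h]
    · rw [if_neg (by omega), if_neg h]
  have f3 : (if 0 ≤ p + 1 ∧ p + 1 < N ∧ 0 ≤ q ∧ q < M then pvA arr (p + 1) q else 0) =
      (if p + 1 < N then pvA arr (p + 1) q else 0) := by
    by_cases h : p + 1 < N
    · rw [if_pos (by omega), if_pos h]
    · rw [if_neg (by omega), if_neg h]
  have f4 : (if 0 ≤ p ∧ p < N ∧ 0 ≤ q - 1 ∧ q - 1 < M then pvA arr p (q - 1) else 0) =
      (if 0 ≤ q - 1 then pvA arr p (q - 1) else 0) := by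
    by_cases h : 0 ≤ q - 1
    · rw [if_pos (by omega), if_pos h]
    · rw [if_neg (by omega), if_neg h]
  have f5 : (if 0 ≤ p ∧ p < N ∧ 0 ≤ q + 1 ∧ q + 1 < M then pvA arr p (q + 1) else 0) =
      (if q + 1 < M then pvA arr p (q + 1) else 0) := by
    by_cases h : q + 1 < M
    · rw [if_pos (by omega), if_pos h]
    · rw [if_neg (by omega), if_neg h]
  rw [f1, f2, f3, f4, f5, pvPlus]
  ring

theorem pv_ite_add (c : Prop) [Decidable c] (t x : Int) :
    (if c then t + x else t) = t + (if c then x else 0) := by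
  split_ifs <;> simp

theorem pv_totalA_eq (arr : List (List Int)) (N M i j : Int)
    (hi : 0 ≤ i ∧ i < N) (hj : 0 ≤ j ∧ j < M) :
    pvATotal arr N M i j = pvPlus arr N M i j := by
  rw [pvATotal, show PySem.List.pyRange 0 4 1 = ([0, 1, 2, 3] : List Int) from by decide]
  simp only [List.foldl_cons, List.foldl_nil,
    show PySem.List.pyGetD ([0, 1, 0, -1] : List Int) 0 0 = 0 from by decide,
    show PySem.List.pyGetD ([0, 1, 0, -1] : List Int) 1 0 = 1 from by decide,
    show PySem.List.pyGetD ([0, 1, 0, -1] : List Int) 2 0 = 0 from by decide,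
    show PySem.List.pyGetD ([0, 1, 0, -1] : List Int) 3 0 = -1 from by decide,
    show PySem.List.pyGetD ([1, 0, -1, 0] : List Int) 0 0 = 1 from by decide,
    show PySem.List.pyGetD ([1, 0, -1, 0] : List Int) 1 0 = 0 from by decide,
    show PySem.List.pyGetD ([1, 0, -1, 0] : List Int) 2 0 = -1 from by decide,
    show PySem.List.pyGetD ([1, 0, -1, 0] : List Int) 3 0 = 0 from by decide,
    add_zero, show ∀ x : Int, x + -1 = x - 1 from fun x => by ring]
  simp only [pv_ite_add]
  have g1 : (if 0 ≤ i ∧ i < N ∧ 0 ≤ j + 1 ∧ j + 1 < M then pvA arr i (j + 1) else 0) =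
      (if j + 1 < M then pvA arr i (j + 1) else 0) := by
    by_cases h : j + 1 < M
    · rw [if_pos (by omega), if_pos h]
    · rw [if_neg (by omega), if_neg h]
  have g2 : (if 0 ≤ i + 1 ∧ i + 1 < N ∧ 0 ≤ j ∧ j < M then pvA arr (i + 1) j else 0) =
      (if i + 1 < N then pvA arr (i + 1) j else 0) := by
    by_cases h : i + 1 < N
    · rw [if_pos (by omega), if_pos h]
    · rw [if_neg (by omega), if_neg h]
  have g3 : (if 0 ≤ i ∧ i < N ∧ 0 ≤ j - 1 ∧ j - 1 < M then pvA arr i (j - 1) else 0) =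
      (if 0 ≤ j - 1 then pvA arr i (j - 1) else 0) := by
    by_cases h : 0 ≤ j - 1
    · rw [if_pos (by omega), if_pos h]
    · rw [if_neg (by omega), if_neg h]
  have g4 : (if 0 ≤ i - 1 ∧ i - 1 < N ∧ 0 ≤ j ∧ j < M then pvA arr (i - 1) j else 0) =
      (if 0 ≤ i - 1 then pvA arr (i - 1) j else 0) := by
    by_cases h : 0 ≤ i - 1
    · rw [if_pos (by omega), if_pos h]
    · rw [if_neg (by omega), if_neg h]
  rw [g1, g2, g3, g4, pvPlus]
  ring

theorem pv_main (arr : List (List Int)) (N M : Int) :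
    balloon arr N M = balloon_alt arr N M := by
  have hb : ∀ c ∈ pvCells N M, 0 ≤ c.1 ∧ c.1 < N ∧ 0 ≤ c.2 ∧ c.2 < M :=
    fun c hc => (pv_mem_cells N M c).mp hc
  have hshape0 :
      pvShape ((PySem.List.pyRange 0 N 1).map (fun _ => List.replicate M.toNat (0 : Int))) N M := by
    constructor
    · simp [PySem.List.length_pyRange_one]
    · intro t ht
      rw [List.getD_eq_getElem?_getD, List.getElem?_map,
        List.getElem?_eq_getElem (by simp [PySem.List.length_pyRange_one]; omega)]
      simp
  have hG0 : ∀ p q : Int,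
      pvG ((PySem.List.pyRange 0 N 1).map (fun _ => List.replicate M.toNat (0 : Int))) p q = 0 := by
    intro p q
    have hrow := List.getD_eq_getElem?_getD
      (l := (PySem.List.pyRange 0 N 1).map (fun _ => List.replicate M.toNat (0 : Int)))
      (i := p.toNat) (a := [])
    rw [pvG, hrow, List.getElem?_map]
    cases h : (PySem.List.pyRange 0 N 1)[p.toNat]? with
    | none => simp
    | some x =>
      simp only [Option.map_some, Option.getD_some, List.getD_eq_getElem?_getD,
        List.getElem?_replicate]
      split_ifs <;> rfl
  obtain ⟨hshapeF, hGF⟩ := pv_fold_scatter arr N M (pvCells N M) _ hshape0 hb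
  set SF := (pvCells N M).foldl (fun S c => pvScatter arr N M S c.1 c.2)
    ((PySem.List.pyRange 0 N 1).map (fun _ => List.replicate M.toNat (0 : Int))) with hSF
  have hentry : ∀ p q : Int, 0 ≤ p → p < N → 0 ≤ q → q < M →
      pvG SF p q = pvPlus arr N M p q := by
    intro p q h1 h2 h3 h4
    rw [hGF p q ⟨h1, h2⟩ ⟨h3, h4⟩, hG0, pv_sum_c arr N M p q ⟨h1, h2⟩ ⟨h3, h4⟩, zero_add]
  have hlenF : SF.length = N.toNat := hshapeF.1
  have hrowF : ∀ t : Nat, t < N.toNat → (SF.getD t []).length = M.toNat := hshapeF.2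
  have hSFeq : SF = (PySem.List.pyRange 0 N 1).map
      (fun i => (PySem.List.pyRange 0 M 1).map (fun j => pvPlus arr N M i j)) := by
    apply List.ext_getElem
    · rw [hlenF]; simp [PySem.List.length_pyRange_one]
    · intro t h1 h2
      have htN : t < N.toNat := by omega
      have hrowget : SF.getD t [] = SF[t] := by
        rw [List.getD_eq_getElem?_getD, List.getElem?_eq_getElem h1]; rfl
      rw [List.getElem_map]
      apply List.ext_getElem
      · rw [← hrowget, hrowF t htN]
        simp [PySem.List.length_pyRange_one]
      · intro u u1 u2
        have huM : u < M.toNat := by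
          rw [← hrowget, hrowF t htN] at u1; exact u1
        have hL : SF[t][u] = pvG SF (t : Int) (u : Int) := by
          rw [pvG, Int.toNat_natCast, Int.toNat_natCast, hrowget,
            List.getD_eq_getElem?_getD, List.getElem?_eq_getElem u1]
          rfl
        rw [hL, hentry (t : Int) (u : Int) (by omega) (by omega) (by omega) (by omega)]
        simp only [List.getElem_map, PySem.List.getElem_pyRange_one, zero_add]
  rw [balloon, balloon_alt]
  have hBS : (PySem.List.pyRange 0 N 1).foldl
      (fun S i => (PySem.List.pyRange 0 M 1).foldl (fun S j => pvScatter arr N M S i j) S)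
      ((PySem.List.pyRange 0 N 1).map (fun _ => List.replicate M.toNat (0 : Int))) = SF := by
    rw [hSF, pvCells, List.foldl_flatMap]
    simp only [List.foldl_map]
  rw [hBS, hSFeq]
  simp only [List.foldl_map, pv_if_lt_eq_max]
  apply PySem.List.foldl_congr_mem
  intro acc i hi
  apply PySem.List.foldl_congr_mem
  intro acc2 j hj
  rw [PySem.List.mem_pyRange_one] at hi hj
  rw [pv_totalA_eq arr N M i j hi hj]

-- ===== VERDICT (by name: the statement is the Claim_ definition above) =====
theorem balloon_spec : Claim_equal_balloon := by
  intro arr N M _ _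
  unfold Spec_balloon
  exact pv_main arr N M
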